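-- pv_equiv track=rewrite | github.com/bharatagarwal/bctci | 36.01-adjacency-list-validation-mine-improved.py | valid_adjacency_list
-- ===== SOURCE A (Python) =====
-- def valid_adjacency_list(graph):
--     V = len(graph)
--
--     sets = list()
--
--     for node, neighbors in enumerate(graph):
--         seen = set()
--
--         for nbr in neighbors:
--             # invalid node
--             if nbr < 0 or nbr >= V:
--                 return False
--             # self membership
--             elif nbr == node:
--                 return False
--
--             seen.add(nbr)
--
--         # duplicate check (parallel edge check)
--         if len(seen) != len(neighbors):
--             return False
--
--         sets.append(seen)
--
--     # symmetry check
--     for node in range(V):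
--         for val in sets[node]:
--             if node not in sets[val]:
--                 return False
--
--     return True
-- ===== SOURCE B (Python) =====
-- def valid_adjacency_list(graph):
--     V = len(graph)
--     edges = []
--     for node, neighbors in enumerate(graph):
--         for nbr in neighbors:
--             if nbr < 0 or nbr >= V or nbr == node:
--                 return False
--             edges.append((node, nbr))
--     fwd = sorted(edges)
--     # a duplicate (parallel) edge shows up as two equal adjacent tuples after sorting
--     for x, y in zip(fwd, fwd[1:]):
--         if x == y:
--             return False
--     # symmetric iff the sorted edge list equals the sorted list of reversed edges
--     return fwd == sorted((b, a) for a, b in edges)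
-- ===== Notes on version B (the rewrite author's own statement) =====
-- stated objective: alternative
-- what changed: Replaces hashed-set membership entirely by sorting: one pass collects all directed (node,nbr) edges while checking bounds and self-loops, then duplicates are detected as equal adjacent tuples in the sorted edge list and symmetry by comparing that sorted list with the sorted list of reversed edges.
import Mathlib
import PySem

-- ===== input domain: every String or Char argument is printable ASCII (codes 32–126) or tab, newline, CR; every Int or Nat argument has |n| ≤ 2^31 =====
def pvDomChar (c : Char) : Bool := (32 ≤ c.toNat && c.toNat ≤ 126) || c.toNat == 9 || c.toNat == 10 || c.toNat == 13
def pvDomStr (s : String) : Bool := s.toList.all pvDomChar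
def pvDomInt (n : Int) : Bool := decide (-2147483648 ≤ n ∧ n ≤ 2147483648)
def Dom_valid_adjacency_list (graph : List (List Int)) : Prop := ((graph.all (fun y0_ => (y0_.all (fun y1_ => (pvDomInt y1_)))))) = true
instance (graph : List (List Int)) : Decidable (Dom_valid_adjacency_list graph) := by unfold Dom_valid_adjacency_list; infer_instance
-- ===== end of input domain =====

-- B drops the hashed per-node sets: it collects all directed (node,nbr) edges in one pass (with the
-- bounds/self-loop checks), then finds duplicates as equal adjacent tuples in the sorted edge list
-- and checks symmetry by comparing that sorted list with the sorted list of reversed edges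
-- (alternative sort-based algorithm, O(V + E log E)).

-- ===== PORT A =====
-- inner 'for nbr in neighbors' loop of A (early return False = none)
def vaInner (V node : Int) : List Int → PySem.Set Int → Option (PySem.Set Int)
  | [], seen => some seen
  | nbr :: rest, seen =>
    if nbr < 0 ∨ V ≤ nbr then none
    else if nbr = node then none
    else vaInner V node rest (PySem.Set.add seen nbr)

-- outer 'for node, neighbors in enumerate(graph)' loop building 'sets'
def vaOuter (V : Int) : List (Int × List Int) → List (PySem.Set Int) → Option (List (PySem.Set Int))
  | [], sets => some sets
  | (node, nbrs) :: rest, sets =>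
    match vaInner V node nbrs [] with
    | none => none
    | some seen =>
      if (PySem.Set.len seen : Int) ≠ (nbrs.length : Int) then none
      else vaOuter V rest (sets ++ [seen])

-- symmetry loop 'for node in range(V): for val in sets[node]: …'
-- (the indices node and val are always in range when this loop runs, so the .getD [] default is never used)
def vaSym (sets : List (PySem.Set Int)) : List Int → Bool
  | [] => true
  | node :: rest =>
    if ((PySem.List.pyGet? sets node).getD []).all
        (fun val => PySem.Set.contains ((PySem.List.pyGet? sets val).getD []) node)
    then vaSym sets rest else false

def valid_adjacency_list (graph : List (List Int)) : Bool :=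
  let V : Int := graph.length
  match vaOuter V (PySem.List.enumerate graph) [] with
  | none => false
  | some sets => vaSym sets (PySem.List.pyRange 0 V 1)

-- ===== PORT B =====
-- inner 'for nbr in neighbors' loop of B: bounds/self-loop check, append the directed edge
def vbInner (V node : Int) : List Int → List (Int × Int) → Option (List (Int × Int))
  | [], edges => some edges
  | nbr :: rest, edges =>
    if nbr < 0 ∨ V ≤ nbr ∨ nbr = node then none
    else vbInner V node rest (edges ++ [(node, nbr)])

-- outer 'for node, neighbors in enumerate(graph)' loop of B
def vbOuter (V : Int) : List (Int × List Int) → List (Int × Int) → Option (List (Int × Int))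
  | [], edges => some edges
  | (node, nbrs) :: rest, edges =>
    match vbInner V node nbrs edges with
    | none => none
    | some e => vbOuter V rest e

-- 'for x, y in zip(fwd, fwd[1:]): if x == y: return False'
def vbAdjDup (fwd : List (Int × Int)) : Bool :=
  (fwd.zip (PySem.List.slice fwd (some 1) none)).any (fun xy => xy.1 == xy.2)

def valid_adjacency_list_alt (graph : List (List Int)) : Bool :=
  let V : Int := graph.length
  match vbOuter V (PySem.List.enumerate graph) [] with
  | none => false
  | some edges =>
    let fwd := PySem.List.sorted2 edges Prod.fst Prod.snd
    if vbAdjDup fwd then false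
    else fwd == PySem.List.sorted2 (edges.map (fun ab => (ab.2, ab.1))) Prod.fst Prod.snd

-- ===== PRECONDITION & SPEC =====
def Spec_valid_adjacency_list (graph : List (List Int)) (out : Bool) : Prop := out = valid_adjacency_list_alt graph
instance (graph : List (List Int)) (out : Bool) : Decidable (Spec_valid_adjacency_list graph out) := by unfold Spec_valid_adjacency_list; infer_instance

-- ===== CLAIM (what is proved, stated in full; the proofs are below) =====
def Claim_equal_valid_adjacency_list : Prop := ∀ (graph : List (List Int)), Dom_valid_adjacency_list graph → Spec_valid_adjacency_list graph (valid_adjacency_list graph)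

-- ===== LEMMAS AND PROOFS =====

-- valid single neighbor: in bounds and not a self-loop
def okN (V node nbr : Int) : Bool := decide (0 ≤ nbr) && decide (nbr < V) && (nbr != node)

-- all directed edges of the (enumerated) graph
def pairsOf (L : List (Int × List Int)) : List (Int × Int) :=
  L.flatMap (fun p => p.2.map (fun nbr => (p.1, nbr)))

lemma vaInner_eq (V node : Int) (nbrs : List Int) (seen : PySem.Set Int) :
    vaInner V node nbrs seen =
      if nbrs.all (okN V node) then some (PySem.Set.update seen nbrs) else none := by
  induction nbrs generalizing seen with
  | nil => simp [vaInner, PySem.Set.update_nil]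
  | cons nbr rest ih =>
    by_cases hb : nbr < 0 ∨ V ≤ nbr
    · have hok : okN V node nbr = false := by simp [okN]; omega
      simp [vaInner, hb, hok]
    · by_cases hn : nbr = node
      · subst hn
        have hok : okN V nbr nbr = false := by simp [okN]
        simp [vaInner, hb, hok]
      · have hok : okN V node nbr = true := by simp [okN, hn]; omega
        simp [vaInner, hb, hn, hok, ih, PySem.Set.update_cons]

lemma vaOuter_eq (V : Int) (L : List (Int × List Int)) (sets : List (PySem.Set Int)) :
    vaOuter V L sets =
      if L.all (fun p => p.2.all (okN V p.1) &&
          ((PySem.Set.ofList p.2).length == p.2.length)) then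
        some (sets ++ L.map (fun p => PySem.Set.ofList p.2))
      else none := by
  induction L generalizing sets with
  | nil => simp [vaOuter]
  | cons p rest ih =>
    obtain ⟨node, nbrs⟩ := p
    by_cases hok : nbrs.all (okN V node)
    · by_cases hlen : (PySem.Set.ofList nbrs).length = nbrs.length
      · simp only [vaOuter, vaInner_eq, hok, if_pos, PySem.Set.update_nil_left,
          PySem.Set.len, ih, List.all_cons, Bool.true_and]
        have hb : (List.length (PySem.Set.ofList nbrs) == nbrs.length) = true := by
          simp [hlen]
        rw [hb]
        simp only [Bool.true_and]
        simp [hlen]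
      · have hlen' : ((PySem.Set.ofList nbrs).length : Int) ≠ (nbrs.length : Int) := by
          exact_mod_cast hlen
        simp [vaOuter, vaInner_eq, hok, PySem.Set.update_nil_left, PySem.Set.len, hlen, hlen']
    · simp [vaOuter, vaInner_eq, hok]

lemma vbInner_eq (V node : Int) (nbrs : List Int) (edges : List (Int × Int)) :
    vbInner V node nbrs edges =
      if nbrs.all (okN V node) then
        some (edges ++ nbrs.map (fun nbr => (node, nbr)))
      else none := by
  induction nbrs generalizing edges with
  | nil => simp [vbInner]
  | cons nbr rest ih =>
    by_cases hb : nbr < 0 ∨ V ≤ nbr ∨ nbr = node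
    · have hok : okN V node nbr = false := by simp [okN]; omega
      simp [vbInner, hb, hok]
    · have hok : okN V node nbr = true := by simp [okN]; omega
      simp [vbInner, hb, ih, hok]

lemma vbOuter_eq (V : Int) (L : List (Int × List Int)) (edges : List (Int × Int)) :
    vbOuter V L edges =
      if L.all (fun p => p.2.all (okN V p.1)) then
        some (edges ++ pairsOf L)
      else none := by
  induction L generalizing edges with
  | nil => simp [vbOuter, pairsOf]
  | cons p rest ih =>
    obtain ⟨node, nbrs⟩ := p
    by_cases hok : nbrs.all (okN V node)
    · have hp : pairsOf ((node, nbrs) :: rest)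
          = nbrs.map (fun nbr => (node, nbr)) ++ pairsOf rest := by
        simp [pairsOf]
      cases hr : rest.all (fun p => p.2.all (okN V p.1)) <;>
        simp [vbOuter, vbInner_eq, hok, hr, hp, ih]
    · simp [vbOuter, vbInner_eq, hok]

lemma pvOfList_sublist {α : Type} [BEq α] [LawfulBEq α] (xs : List α) :
    List.Sublist (PySem.Set.ofList xs) xs := by
  induction xs with
  | nil => simp
  | cons x xs ih =>
    rw [PySem.Set.ofList_cons]
    refine List.Sublist.cons₂ x ?_
    have h2 : List.Sublist ((PySem.Set.ofList xs).discard x) (PySem.Set.ofList xs) := by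
      simp [PySem.Set.discard]
    exact h2.trans ih

lemma pvLen_ofList_iff {α : Type} [BEq α] [LawfulBEq α] (xs : List α) :
    (PySem.Set.ofList xs).length = xs.length ↔ xs.Nodup := by
  constructor
  · intro h
    have he := (pvOfList_sublist xs).eq_of_length h
    rw [← he]; exact PySem.Set.nodup_ofList xs
  · intro h; rw [PySem.Set.ofList_eq_self_of_nodup xs h]

lemma pvMem_pairsOf (L : List (Int × List Int)) (q : Int × Int) :
    q ∈ pairsOf L ↔ ∃ p ∈ L, p.1 = q.1 ∧ q.2 ∈ p.2 := by
  simp only [pairsOf, List.mem_flatMap, List.mem_map]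
  constructor
  · rintro ⟨p, hp, b, hb, rfl⟩; exact ⟨p, hp, rfl, hb⟩
  · rintro ⟨p, hp, h1, h2⟩; exact ⟨p, hp, q.2, h2, by rw [h1]⟩

lemma pvPairs_nodup (L : List (Int × List Int)) (h : L.Pairwise (fun p q => p.1 ≠ q.1)) :
    (pairsOf L).Nodup ↔ ∀ p ∈ L, p.2.Nodup := by
  induction L with
  | nil => simp [pairsOf]
  | cons p rest ih =>
    obtain ⟨hhead, htail⟩ := List.pairwise_cons.mp h
    rw [show pairsOf (p :: rest) = p.2.map (fun nbr => (p.1, nbr)) ++ pairsOf rest from by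
      simp [pairsOf]]
    rw [List.nodup_append]
    have hinj : Function.Injective (fun nbr => (p.1, nbr) : Int → Int × Int) := by
      intro a b hab; simpa using hab
    have hdisj : ∀ a ∈ p.2.map (fun nbr => (p.1, nbr)), ∀ b ∈ pairsOf rest, a ≠ b := by
      intro a ha b hb he
      subst he
      simp only [List.mem_map] at ha
      obtain ⟨c, _, rfl⟩ := ha
      rw [pvMem_pairsOf] at hb
      obtain ⟨r, hr, h1, _⟩ := hb
      exact hhead r hr h1.symm
    rw [ih htail]
    simp only [List.forall_mem_cons]
    constructor
    · rintro ⟨h1, h2, _⟩; exact ⟨(List.nodup_map_iff hinj).mp h1, h2⟩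
    · rintro ⟨h1, h2⟩; exact ⟨(List.nodup_map_iff hinj).mpr h1, h2, hdisj⟩

lemma vaSym_eq_all (sets : List (PySem.Set Int)) (nodes : List Int) :
    vaSym sets nodes = nodes.all
      (fun node => ((PySem.List.pyGet? sets node).getD []).all
        (fun val => PySem.Set.contains ((PySem.List.pyGet? sets val).getD []) node)) := by
  induction nodes with
  | nil => rfl
  | cons n rest ih =>
    simp only [vaSym, List.all_cons]
    cases hc : ((PySem.List.pyGet? sets n).getD []).all
        (fun val => PySem.Set.contains ((PySem.List.pyGet? sets val).getD []) n)
    · rw [if_neg (by simp), Bool.false_and]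
    · rw [if_pos rfl, Bool.true_and, ih]

-- Python's tuple comparison is the lexicographic order
lemma beforeLex_eq (a b : Int × Int) :
    (decide (a.1 < b.1) || !decide (b.1 < a.1) && decide (a.2 < b.2))
      = decide ((toLex a : Lex (Int × Int)) < toLex b) := by
  have h : ((toLex a : Lex (Int × Int)) < toLex b) ↔ (a.1 < b.1 ∨ a.1 = b.1 ∧ a.2 < b.2) :=
    Prod.Lex.toLex_lt_toLex
  by_cases h1 : a.1 < b.1
  · simp [h1, h.mpr (Or.inl h1)]
  · by_cases h2 : b.1 < a.1
    · have hn : ¬ ((toLex a : Lex (Int × Int)) < toLex b) := by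
        rw [h]; rintro (hc | ⟨hc, -⟩) <;> omega
      simp [h1, h2, hn]
    · have he : a.1 = b.1 := by omega
      by_cases h3 : a.2 < b.2
      · simp [h1, h2, h3, h.mpr (Or.inr ⟨he, h3⟩)]
      · have hn : ¬ ((toLex a : Lex (Int × Int)) < toLex b) := by
          rw [h]; rintro (hc | ⟨-, hc⟩) <;> omega
        simp [h1, h2, h3, hn]

-- Python's sort of pairs is the sort by the lexicographic key
lemma sorted2_eq_sorted_toLex (xs : List (Int × Int)) :
    PySem.List.sorted2 xs Prod.fst Prod.snd
      = PySem.List.sorted xs (fun p => toLex p) := by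
  have hb : (fun (a b : Int × Int) => decide (a.1 < b.1) || !decide (b.1 < a.1) && decide (a.2 < b.2))
      = (fun (a b : Int × Int) => decide ((toLex a : Lex (Int × Int)) < toLex b)) := by
    funext a b; exact beforeLex_eq a b
  unfold PySem.List.sorted2 PySem.List.sorted
  simp [hb]

lemma toLex_injective : Function.Injective (fun p : Int × Int => toLex p) := by
  intro a b h
  simpa using h

-- the adjacent-duplicate scan of a sorted list decides Nodup
lemma adjdup_iff (l : List (Int × Int))
    (hs : l.Pairwise (fun a b => (toLex a : Lex (Int × Int)) ≤ toLex b)) :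
    ((l.zip (l.drop 1)).any (fun xy => xy.1 == xy.2) = false) ↔ l.Nodup := by
  induction l with
  | nil => simp
  | cons x t ih =>
    cases t with
    | nil => simp
    | cons y t2 =>
      obtain ⟨hx, ht⟩ := List.pairwise_cons.mp hs
      have ih2 := ih ht
      simp only [List.drop_one, List.tail_cons, List.zip_cons_cons, List.any_cons,
        Bool.or_eq_false_iff, beq_eq_false_iff_ne, ne_eq] at ih2 ⊢
      by_cases hxy : x = y
      · subst hxy
        simp [List.nodup_cons]
      · constructor
        · rintro ⟨-, hrest⟩
          have hnd := ih2.mp (by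
            cases t2 with
            | nil => simp
            | cons z t3 => simpa [List.drop_one] using hrest)
          refine List.nodup_cons.mpr ⟨?_, hnd⟩
          intro hmem
          rcases List.mem_cons.mp hmem with h | h
          · exact hxy h
          · -- x strictly below y ≤ every element of t2, contradiction with x ∈ t2
            have hxyle : (toLex x : Lex (Int × Int)) ≤ toLex y := hx y (by simp)
            have hxylt : (toLex x : Lex (Int × Int)) < toLex y := by
              rcases lt_or_eq_of_le hxyle with hlt | heq
              · exact hlt
              · exact absurd (toLex_injective heq) hxy
            obtain ⟨hy, -⟩ := List.pairwise_cons.mp ht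
            have := hy x h
            have : (toLex x : Lex (Int × Int)) < toLex x := lt_of_lt_of_le hxylt this
            exact absurd this (lt_irrefl _)
        · intro hnd
          obtain ⟨-, hnd2⟩ := List.nodup_cons.mp hnd
          refine ⟨hxy, ?_⟩
          have := ih2.mpr hnd2
          cases t2 with
          | nil => simp
          | cons z t3 => simpa [List.drop_one] using this

-- fwd[1:] is drop 1
lemma slice_one_drop (l : List (Int × Int)) :
    PySem.List.slice l (some 1) none = l.drop 1 := by
  rw [show (some (1 : Int)) = some (((1 : Nat) : Int)) from by norm_num,
    PySem.List.slice_from] <;> simp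

theorem valid_adjacency_list_spec : Claim_equal_valid_adjacency_list := by
  intro graph _
  unfold Spec_valid_adjacency_list
  by_cases hok : (PySem.List.enumerate graph).all
      (fun p => p.2.all (okN (graph.length : Int) p.1)) = true
  · have hfst : (PySem.List.enumerate graph).Pairwise (fun p q => p.1 ≠ q.1) :=
      (PySem.List.pairwise_lt_enumerate graph 0).imp (fun h => ne_of_lt h)
    have hokP : ∀ (k : Nat) (hk : k < graph.length), ∀ v ∈ graph[k],
        0 ≤ v ∧ v < (graph.length : Int) ∧ v ≠ (k : Int) := by
      intro k hk v hv
      rw [List.all_eq_true] at hok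
      have h1 := hok ((k : Int), graph[k])
        (by rw [PySem.List.mem_enumerate_iff]; exact ⟨k, hk, by simp⟩)
      rw [List.all_eq_true] at h1
      have h2 := h1 v hv
      simp only [okN, Bool.and_eq_true, decide_eq_true_eq, bne_iff_ne] at h2
      exact ⟨h2.1.1, h2.1.2, h2.2⟩
    have hmapsets : (PySem.List.enumerate graph).map (fun p => PySem.Set.ofList p.2)
        = graph.map (fun l => PySem.Set.ofList l) := by
      conv_rhs => rw [← PySem.List.map_snd_enumerate graph 0]
      rw [List.map_map]
      rfl
    set P := pairsOf (PySem.List.enumerate graph) with hPdef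
    have hpair : ∀ q : Int × Int, q ∈ P ↔
        ∃ (k : Nat) (hk : k < graph.length), q.1 = (k : Int) ∧ q.2 ∈ graph[k] := by
      intro q
      rw [hPdef, pvMem_pairsOf]
      constructor
      · rintro ⟨p, hp, h1, h2⟩
        rw [PySem.List.mem_enumerate_iff] at hp
        obtain ⟨k, hk, rfl⟩ := hp
        exact ⟨k, hk, by simpa using h1.symm, h2⟩
      · rintro ⟨k, hk, h1, h2⟩
        refine ⟨((k : Int), graph[k]), ?_, h1.symm, h2⟩
        rw [PySem.List.mem_enumerate_iff]
        exact ⟨k, hk, by simp⟩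
    have hfwd_pair := PySem.List.sorted_pairwise P (fun p : Int × Int => toLex p)
    have hfwd_perm := PySem.List.sorted_perm P (fun p : Int × Int => toLex p) false
    have eBmatch : valid_adjacency_list_alt graph
        = (if vbAdjDup (PySem.List.sorted2 P Prod.fst Prod.snd) then false
           else PySem.List.sorted2 P Prod.fst Prod.snd
              == PySem.List.sorted2 (P.map (fun ab => (ab.2, ab.1))) Prod.fst Prod.snd) := by
      simp [valid_adjacency_list_alt, vbOuter_eq, hok, hPdef]
    have hadj : vbAdjDup (PySem.List.sorted2 P Prod.fst Prod.snd) = false ↔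
        (PySem.List.sorted P (fun p : Int × Int => toLex p)).Nodup := by
      rw [vbAdjDup, sorted2_eq_sorted_toLex, slice_one_drop]
      exact adjdup_iff _ hfwd_pair
    by_cases hdup : ∀ p ∈ PySem.List.enumerate graph, p.2.Nodup
    · have hndP : P.Nodup := (pvPairs_nodup _ hfst).mpr hdup
      have hndfwd : (PySem.List.sorted P (fun p : Int × Int => toLex p)).Nodup :=
        hfwd_perm.nodup_iff.mpr hndP
      have hA : (PySem.List.enumerate graph).all
          (fun p => p.2.all (okN (graph.length : Int) p.1) &&
            ((PySem.Set.ofList p.2).length == p.2.length)) = true := by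
        rw [List.all_eq_true]
        intro p hp
        rw [List.all_eq_true] at hok
        rw [Bool.and_eq_true]
        exact ⟨hok p hp, by simp [(pvLen_ofList_iff p.2).mpr (hdup p hp)]⟩
      have eA : valid_adjacency_list graph
          = vaSym (graph.map (fun l => PySem.Set.ofList l))
              (PySem.List.pyRange 0 (graph.length : Int)) := by
        simp [valid_adjacency_list, vaOuter_eq, hA, hmapsets]
      have eB : valid_adjacency_list_alt graph
          = (PySem.List.sorted P (fun p : Int × Int => toLex p)
              == PySem.List.sorted (P.map (fun ab => (ab.2, ab.1)))
                  (fun p : Int × Int => toLex p)) := by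
        rw [eBmatch, if_neg (by rw [Bool.not_eq_true, hadj]; exact hndfwd),
          sorted2_eq_sorted_toLex, sorted2_eq_sorted_toLex]
      -- B's final comparison holds iff every edge's reverse is an edge
      have hBiff : (PySem.List.sorted P (fun p : Int × Int => toLex p)
              = PySem.List.sorted (P.map (fun ab => (ab.2, ab.1)))
                  (fun p : Int × Int => toLex p))
          ↔ (∀ q ∈ P, (q.2, q.1) ∈ P) := by
        constructor
        · intro he q hq
          have hperm : P.Perm (P.map (fun ab => (ab.2, ab.1))) :=
            (hfwd_perm.symm.trans (he ▸ PySem.List.sorted_perm _ _ false))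
          have : q ∈ P.map (fun ab : Int × Int => (ab.2, ab.1)) := hperm.mem_iff.mp hq
          obtain ⟨r, hr, hrq⟩ := List.mem_map.mp this
          have : r = (q.2, q.1) := by
            obtain ⟨a, b⟩ := r; obtain ⟨c, d⟩ := q
            simp only [Prod.mk.injEq] at hrq ⊢
            exact ⟨hrq.2, hrq.1⟩
          rw [← this]; exact hr
        · intro hcl
          apply PySem.List.sorted_eq_sorted_of_perm _ _ _ toLex_injective
          have hndM : (P.map (fun ab : Int × Int => (ab.2, ab.1))).Nodup := by
            refine (List.nodup_map_iff ?_).mpr hndP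
            intro a b h; obtain ⟨a1, a2⟩ := a; obtain ⟨b1, b2⟩ := b
            simp at h; simp [h]
          rw [List.perm_ext_iff_of_nodup hndP hndM]
          intro q
          constructor
          · intro hq
            refine List.mem_map.mpr ⟨(q.2, q.1), hcl q hq, rfl⟩
          · intro hq
            obtain ⟨r, hr, hrq⟩ := List.mem_map.mp hq
            have : q = (r.2, r.1) := hrq.symm
            rw [this]
            exact hcl r hr
      -- A's symmetry scan holds iff every edge's reverse is an edge
      have hsets : ∀ (n : Int) (h0 : 0 ≤ n) (hn : n < (graph.length : Int)),
          (PySem.List.pyGet? (graph.map (fun l => PySem.Set.ofList l)) n).getD []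
            = PySem.Set.ofList (graph[n.toNat]'(by omega)) := by
        intro n h0 hn
        obtain ⟨k, rfl⟩ := Int.eq_ofNat_of_zero_le h0
        have hlt : k < graph.length := by exact_mod_cast hn
        simp [PySem.List.pyGet?_natCast,
          List.getElem?_eq_getElem
            (show k < (graph.map (fun l => PySem.Set.ofList l)).length by simpa using hlt)]
      rw [eA, eB, vaSym_eq_all]
      have hbool : ∀ a b : Bool, (a = true ↔ b = true) → a = b := by decide
      apply hbool
      rw [beq_iff_eq, show ((PySem.List.sorted P (fun p : Int × Int => toLex p)
              = PySem.List.sorted (P.map (fun ab => (ab.2, ab.1)))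
                  (fun p : Int × Int => toLex p)) ↔ (∀ q ∈ P, (q.2, q.1) ∈ P)) from hBiff]
      simp only [List.all_eq_true, PySem.List.mem_pyRange_one, PySem.Set.contains_iff]
      constructor
      · intro h q hq
        rw [hpair] at hq
        obtain ⟨k, hk, h1, h2⟩ := hq
        have hb := hokP k hk q.2 h2
        have hkV : (0:Int) ≤ (k:Int) ∧ (k:Int) < (graph.length : Int) :=
          ⟨by positivity, by exact_mod_cast hk⟩
        have hmem := h (k : Int) hkV q.2
          (by rw [hsets _ hkV.1 hkV.2]
              simp only [PySem.Set.mem_ofList, Int.toNat_natCast]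
              exact h2)
        rw [hsets _ hb.1 hb.2.1, PySem.Set.mem_ofList] at hmem
        rw [hpair]
        refine ⟨q.2.toNat, by omega, by simp [Int.toNat_of_nonneg hb.1], ?_⟩
        show q.1 ∈ graph[q.2.toNat]
        rw [h1]; exact hmem
      · intro h node hnode val hval
        rw [hsets _ hnode.1 hnode.2, PySem.Set.mem_ofList] at hval
        have hb := hokP node.toNat (by omega) val hval
        have hrev := h (node, val)
          (by rw [hpair]
              exact ⟨node.toNat, by omega, by simp [Int.toNat_of_nonneg hnode.1], hval⟩)
        rw [hpair] at hrev
        obtain ⟨m, hm, h1, h2⟩ := hrev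
        have h1' : val = (m : Int) := h1
        have h2' : node ∈ graph[m] := h2
        rw [hsets _ hb.1 hb.2.1, PySem.Set.mem_ofList]
        have hvm : val.toNat = m := by omega
        subst hvm
        exact h2'
    · have hndP : ¬ P.Nodup := by
        intro hc
        exact hdup ((pvPairs_nodup _ hfst).mp hc)
      have hA : ¬ ((PySem.List.enumerate graph).all
          (fun p => p.2.all (okN (graph.length : Int) p.1) &&
            ((PySem.Set.ofList p.2).length == p.2.length)) = true) := by
        intro hc
        apply hdup
        intro p hp
        rw [List.all_eq_true] at hc
        have := hc p hp
        rw [Bool.and_eq_true] at this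
        exact (pvLen_ofList_iff p.2).mp (by simpa using this.2)
      have eA : valid_adjacency_list graph = false := by
        simp [valid_adjacency_list, vaOuter_eq, hA]
      have eB : valid_adjacency_list_alt graph = false := by
        rw [eBmatch, if_pos]
        cases hc : vbAdjDup (PySem.List.sorted2 P Prod.fst Prod.snd)
        · exact absurd (hfwd_perm.nodup_iff.mp (hadj.mp hc)) hndP
        · rfl
      rw [eA, eB]
  · have hA : ¬ ((PySem.List.enumerate graph).all
        (fun p => p.2.all (okN (graph.length : Int) p.1) &&
          ((PySem.Set.ofList p.2).length == p.2.length)) = true) := by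
      intro hc
      apply hok
      rw [List.all_eq_true] at hc ⊢
      intro p hp
      have hc2 := hc p hp
      rw [Bool.and_eq_true] at hc2
      exact hc2.1
    have eA : valid_adjacency_list graph = false := by
      simp [valid_adjacency_list, vaOuter_eq, hA]
    have eB : valid_adjacency_list_alt graph = false := by
      simp [valid_adjacency_list_alt, vbOuter_eq, hok]
    rw [eA, eB]
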